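-- pv_equiv track=rewrite | github.com/aktivhoon/gymMDT | gymMDT/scenarios/lee_modified.py | code2blocks
-- ===== SOURCE A (Python) =====
-- def gene2block(genotype):
--     if genotype == 0:
--         taskset = 'fr'
--     elif genotype == 1:
--         taskset = 'fd'
--     elif genotype == 2:
--         taskset = 'grY'
--     elif genotype == 3:
--         taskset = 'grB'
--     elif genotype == 4:
--         taskset = 'grR'
--     elif genotype == 5:
--         taskset = 'gdY'
--     elif genotype == 6:
--         taskset = 'gdB'
--     elif genotype == 7:
--         taskset = 'gdR'
--     else:
--         raise ValueError("genotype must be in range 0-7")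
--     return taskset
--
-- def code2blocks(code):
--     blocks = []
--     for i, genotype in enumerate(code):
--             if i % 4 == 0:
--                 block_list = []
--             block_list.append(gene2block(genotype))
--             if i % 4 == 3:
--                 blocks.append(block_list)
--     return blocks
-- ===== SOURCE B (Python) =====
-- def gene2block(genotype):
--     if genotype == 0:
--         taskset = 'fr'
--     elif genotype == 1:
--         taskset = 'fd'
--     elif genotype == 2:
--         taskset = 'grY'
--     elif genotype == 3:
--         taskset = 'grB'
--     elif genotype == 4:
--         taskset = 'grR'
--     elif genotype == 5:
--         taskset = 'gdY'
--     elif genotype == 6: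
--         taskset = 'gdB'
--     elif genotype == 7:
--         taskset = 'gdR'
--     else:
--         raise ValueError("genotype must be in range 0-7")
--     return taskset
--
-- def code2blocks(code):
--     mapped = [gene2block(g) for g in code]
--     return [mapped[i * 4:i * 4 + 4] for i in range(len(mapped) // 4)]
-- ===== Notes on version B (the rewrite author's own statement) =====
-- stated objective: simpler
-- what changed: Replaces A's interleaved modulo-sentinel accumulation (reset/append state inside one enumerate loop) with two plain phases: map every genotype to its string, then chunk the complete groups of four by slicing.
import Mathlib
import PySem

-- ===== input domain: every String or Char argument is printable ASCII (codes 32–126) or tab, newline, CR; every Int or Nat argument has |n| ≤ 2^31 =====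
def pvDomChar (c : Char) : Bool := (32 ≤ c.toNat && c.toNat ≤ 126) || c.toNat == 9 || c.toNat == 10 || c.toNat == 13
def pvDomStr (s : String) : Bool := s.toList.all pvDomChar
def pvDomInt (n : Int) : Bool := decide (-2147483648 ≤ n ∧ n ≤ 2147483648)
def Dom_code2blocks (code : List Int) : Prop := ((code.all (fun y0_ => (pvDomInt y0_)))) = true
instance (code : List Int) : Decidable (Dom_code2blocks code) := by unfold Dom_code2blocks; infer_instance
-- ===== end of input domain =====

-- B rewrites A's interleaved modulo-sentinel accumulation as two plain phases: map all genotypes, then slice complete groups of four (objective: simpler).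

-- ===== PORT A =====
-- gene2block: the final 'else' branch raises ValueError in Python; those inputs are
-- excluded by Pre_code2blocks, so the port returns "" there (never reached under Pre_).
def gene2blockA (genotype : Int) : String :=
  if genotype = 0 then "fr"
  else if genotype = 1 then "fd"
  else if genotype = 2 then "grY"
  else if genotype = 3 then "grB"
  else if genotype = 4 then "grR"
  else if genotype = 5 then "gdY"
  else if genotype = 6 then "gdB"
  else if genotype = 7 then "gdR"
  else ""

def code2blocks (code : List Int) : List (List String) :=
  let st := (PySem.List.enumerate code 0).foldl
    (fun (s : List (List String) × List String) (p : Int × Int) =>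
      let block_list := if PySem.Int.mod p.1 4 = 0 then [] else s.2
      let block_list := block_list ++ [gene2blockA p.2]
      let blocks := if PySem.Int.mod p.1 4 = 3 then s.1 ++ [block_list] else s.1
      (blocks, block_list)) ([], [])
  st.1

-- ===== PORT B =====
-- same helper as A's (B keeps gene2block unchanged); same ValueError note applies.
def gene2blockB (genotype : Int) : String :=
  if genotype = 0 then "fr"
  else if genotype = 1 then "fd"
  else if genotype = 2 then "grY"
  else if genotype = 3 then "grB"
  else if genotype = 4 then "grR"
  else if genotype = 5 then "gdY"
  else if genotype = 6 then "gdB"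
  else if genotype = 7 then "gdR"
  else ""

def code2blocks_alt (code : List Int) : List (List String) :=
  let mapped := code.map gene2blockB
  (PySem.List.pyRange 0 (PySem.Int.floordiv (mapped.length : Int) 4) 1).map
    (fun i => PySem.List.slice mapped (some (i * 4)) (some (i * 4 + 4)))

-- ===== PRECONDITION & SPEC =====
-- Pre_ excludes exactly the inputs on which Python A raises ValueError
-- (a genotype outside 0..7); Python B raises there too.
def Pre_code2blocks (code : List Int) : Prop :=
  ∀ g ∈ code, 0 ≤ g ∧ g ≤ 7
instance (code : List Int) : Decidable (Pre_code2blocks code) := by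
  unfold Pre_code2blocks; infer_instance
def pvWitness_code2blocks : List Int := [0, 3, 7, 1, 5]

def Spec_code2blocks (code : List Int) (out : List (List String)) : Prop := out = code2blocks_alt code
instance (code : List Int) (out : List (List String)) : Decidable (Spec_code2blocks code out) := by unfold Spec_code2blocks; infer_instance

-- ===== CLAIM (what is proved, stated in full; the proofs are below) =====
def Claim_equal_code2blocks : Prop := ∀ (code : List Int), Dom_code2blocks code → Pre_code2blocks code → Spec_code2blocks code (code2blocks code)

-- ===== LEMMAS AND PROOFS =====

def chunk4 : List String → List (List String)
  | a :: b :: c :: d :: rest => [a, b, c, d] :: chunk4 rest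
  | _ => []

theorem chunk_eq (m : List String) :
    (List.range (m.length / 4)).map (fun k => (m.drop (4 * k)).take 4) = chunk4 m := by
  induction m using chunk4.induct with
  | case1 a b c d rest ih =>
      have hlen : (a :: b :: c :: d :: rest).length / 4 = rest.length / 4 + 1 := by
        simp [List.length_cons]; omega
      rw [hlen, List.range_succ_eq_map]
      simp only [List.map_cons, List.map_map, chunk4]
      refine congrArg₂ List.cons (by simp) ?_
      rw [← ih]
      apply List.map_congr_left
      intro k _
      simp only [Function.comp, Nat.succ_eq_add_one]
      rw [show 4 * (k + 1) = (4 * k) + 4 by ring]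
      rfl
  | case2 x h =>
      match x, h with
      | [], _ => rfl
      | [a], _ => simp [chunk4]
      | [a, b], _ => simp [chunk4]
      | [a, b, c], _ => simp [chunk4]
      | a :: b :: c :: d :: rest, h => exact absurd rfl (h a b c d rest)

theorem alt_bridge (m : List String) :
    (PySem.List.pyRange 0 (PySem.Int.floordiv (m.length : Int) 4) 1).map
      (fun i => PySem.List.slice m (some (i * 4)) (some (i * 4 + 4))) = chunk4 m := by
  have h4 : PySem.Int.floordiv (m.length : Int) 4 = ((m.length / 4 : Nat) : Int) := by
    exact_mod_cast PySem.Int.floordiv_natCast m.length 4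
  rw [h4, PySem.List.pyRange_zero_natCast, List.map_map, ← chunk_eq]
  apply List.map_congr_left
  intro k _
  simp only [Function.comp]
  have e1 : ((k : Int) * 4) = ((4 * k : Nat) : Int) := by push_cast; ring
  rw [e1, show (((4 * k : Nat) : Int) + 4) = (((4 * k : Nat) : Int) + ((4 : Nat) : Int)) by push_cast; ring,
    PySem.List.slice_natCast_add]

def stepA (st : List (List String) × List String) (p : Int × Int) :
    List (List String) × List String :=
  let block_list := if PySem.Int.mod p.1 4 = 0 then [] else st.2
  let block_list := block_list ++ [gene2blockA p.2]
  let blocks := if PySem.Int.mod p.1 4 = 3 then st.1 ++ [block_list] else st.1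
  (blocks, block_list)

theorem foldA_inv (code : List Int) (blocks : List (List String)) (bl : List String)
    (s : Int) (hs : 0 ≤ s) (hm : s % 4 = 0) :
    ((PySem.List.enumerate code s).foldl stepA (blocks, bl)).1
      = blocks ++ chunk4 (code.map gene2blockA) := by
  have me : ∀ t : Int, PySem.Int.mod t 4 = t % 4 := fun t =>
    PySem.Int.mod_eq_emod_of_pos (by norm_num)
  match code with
  | [] => simp [PySem.List.enumerate_nil, chunk4]
  | [a] =>
      simp [PySem.List.enumerate_cons, PySem.List.enumerate_nil, List.foldl, stepA, chunk4]
      omega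
  | [a, b] =>
      simp only [PySem.List.enumerate_cons, PySem.List.enumerate_nil, List.foldl, stepA, me]
      rw [if_pos (by omega : s % 4 = 0), if_neg (by omega : ¬ s % 4 = 3),
        if_neg (by omega : ¬ (s+1) % 4 = 0), if_neg (by omega : ¬ (s+1) % 4 = 3)]
      simp [chunk4]
  | [a, b, c] =>
      simp only [PySem.List.enumerate_cons, PySem.List.enumerate_nil, List.foldl, stepA, me]
      rw [if_pos (by omega : s % 4 = 0), if_neg (by omega : ¬ s % 4 = 3),
        if_neg (by omega : ¬ (s+1) % 4 = 0), if_neg (by omega : ¬ (s+1) % 4 = 3),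
        if_neg (by omega : ¬ (s+1+1) % 4 = 0), if_neg (by omega : ¬ (s+1+1) % 4 = 3)]
      simp [chunk4]
  | a :: b :: c :: d :: rest =>
      have ih := foldA_inv rest (blocks ++ [[gene2blockA a, gene2blockA b, gene2blockA c, gene2blockA d]])
        [gene2blockA a, gene2blockA b, gene2blockA c, gene2blockA d] (s + 4) (by omega) (by omega)
      rw [show s + 4 = s + 1 + 1 + 1 + 1 by ring] at ih
      have e1 : stepA (blocks, bl) (s, a) = (blocks, [gene2blockA a]) := by
        simp only [stepA, me]
        rw [if_pos (by omega : s % 4 = 0), if_neg (by omega : ¬ s % 4 = 3)]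
        simp
      have e2 : stepA (blocks, [gene2blockA a]) (s + 1, b)
          = (blocks, [gene2blockA a, gene2blockA b]) := by
        simp only [stepA, me]
        rw [if_neg (by omega : ¬ (s+1) % 4 = 0), if_neg (by omega : ¬ (s+1) % 4 = 3)]
        simp
      have e3 : stepA (blocks, [gene2blockA a, gene2blockA b]) (s + 1 + 1, c)
          = (blocks, [gene2blockA a, gene2blockA b, gene2blockA c]) := by
        simp only [stepA, me]
        rw [if_neg (by omega : ¬ (s+1+1) % 4 = 0), if_neg (by omega : ¬ (s+1+1) % 4 = 3)]
        simp
      have e4 : stepA (blocks, [gene2blockA a, gene2blockA b, gene2blockA c]) (s + 1 + 1 + 1, d)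
          = (blocks ++ [[gene2blockA a, gene2blockA b, gene2blockA c, gene2blockA d]],
             [gene2blockA a, gene2blockA b, gene2blockA c, gene2blockA d]) := by
        simp only [stepA, me]
        rw [if_neg (by omega : ¬ (s+1+1+1) % 4 = 0), if_pos (by omega : (s+1+1+1) % 4 = 3)]
        simp
      rw [PySem.List.enumerate_cons, List.foldl_cons, e1,
        PySem.List.enumerate_cons, List.foldl_cons, e2,
        PySem.List.enumerate_cons, List.foldl_cons, e3,
        PySem.List.enumerate_cons, List.foldl_cons, e4, ih]
      simp [chunk4]
termination_by code.length

-- ===== VERDICT (by name: the statement is the Claim_ definition above) =====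
theorem code2blocks_spec : Claim_equal_code2blocks := by
  intro code _ _
  show code2blocks code = code2blocks_alt code
  have hA : code2blocks code = ((PySem.List.enumerate code 0).foldl stepA ([], [])).1 := rfl
  have hB : code2blocks_alt code = chunk4 (code.map gene2blockB) :=
    alt_bridge (code.map gene2blockB)
  rw [hA, hB, foldA_inv code [] [] 0 le_rfl rfl]
  simp [show gene2blockA = gene2blockB from rfl]
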